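-- pv_equiv track=rewrite | github.com/kaparoo/similarity-measurement-algorithms | python/dynamic_time_warping.py | get_cost_matrix
-- ===== SOURCE A (Python) =====
-- from typing import List
-- from typing import Sequence
--
-- Matrix = List[List[int]]
--
-- def get_cost_matrix(seq1: Sequence[int], seq2: Sequence[int]) -> Matrix:
--     cost_matrix = [[0 for _ in seq1] for _ in seq2]
--
--     for x2, elem2 in enumerate(seq2):
--         for x1, elem1 in enumerate(seq1):
--             if x2 == 0 and x1 == 0:
--                 penalty = 0
--             elif x2 == 0:
--                 penalty = cost_matrix[0][x1 - 1]
--             elif x1 == 0: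
--                 penalty = cost_matrix[x2 - 1][0]
--             else:
--                 penalty = min(cost_matrix[x2][x1 - 1],
--                               cost_matrix[x2 - 1][x1 - 1],
--                               cost_matrix[x2 - 1][x1])
--             cost_matrix[x2][x1] = abs(elem1 - elem2) + penalty
--
--     return cost_matrix
-- ===== SOURCE B (Python) =====
-- def get_cost_matrix(seq1, seq2):
--     memo = {}
--
--     def cost(x2, x1):
--         key = (x2, x1)
--         if key in memo:
--             return memo[key]
--         if x2 == 0 and x1 == 0:
--             penalty = 0
--         elif x2 == 0:
--             penalty = cost(0, x1 - 1)
--         elif x1 == 0: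
--             penalty = cost(x2 - 1, 0)
--         else:
--             penalty = min(cost(x2, x1 - 1), cost(x2 - 1, x1 - 1), cost(x2 - 1, x1))
--         value = abs(seq1[x1] - seq2[x2]) + penalty
--         memo[key] = value
--         return value
--
--     return [[cost(x2, x1) for x1 in range(len(seq1))]
--             for x2 in range(len(seq2))]
-- ===== Notes on version B (the rewrite author's own statement) =====
-- stated objective: alternative
-- what changed: Replaces A's bottom-up in-place table fill (nested enumerate loops mutating a preallocated zero matrix with edge-case branches on the indices) by top-down recursion on the DTW recurrence with a dictionary memo; the matrix is assembled afterwards by querying the recursive cost function.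
import Mathlib
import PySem

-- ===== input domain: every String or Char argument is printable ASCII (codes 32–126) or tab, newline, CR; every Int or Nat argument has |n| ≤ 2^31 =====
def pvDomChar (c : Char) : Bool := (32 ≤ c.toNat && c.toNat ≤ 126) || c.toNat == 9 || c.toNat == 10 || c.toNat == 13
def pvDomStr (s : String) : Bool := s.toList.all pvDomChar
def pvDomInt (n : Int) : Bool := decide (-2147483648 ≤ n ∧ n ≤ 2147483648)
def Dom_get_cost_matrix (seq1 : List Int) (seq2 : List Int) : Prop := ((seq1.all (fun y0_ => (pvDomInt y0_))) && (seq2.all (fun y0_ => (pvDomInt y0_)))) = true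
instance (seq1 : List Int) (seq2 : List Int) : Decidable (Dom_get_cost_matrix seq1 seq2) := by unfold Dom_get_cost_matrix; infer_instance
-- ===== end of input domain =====

-- B replaces A's bottom-up in-place table fill by top-down memoized recursion on the DTW
-- recurrence (a dict memo), assembling the matrix by querying the recursive cost function.

-- ===== PORT A =====
-- body of A's inner loop: computes cell (x2, x1) = p2.1, p1.1 and assigns it in place.
-- Python's cost_matrix[x2][x1] = v: both indices are nonnegative and in range here, so List.set at .toNat is exact.
def pvCellStep (p2 : Int × Int) (cm : List (List Int)) (p1 : Int × Int) : List (List Int) :=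
  let penalty : Int :=
    if p2.1 = 0 ∧ p1.1 = 0 then 0
    else if p2.1 = 0 then PySem.List.pyGetD (PySem.List.pyGetD cm 0 []) (p1.1 - 1) 0
    else if p1.1 = 0 then PySem.List.pyGetD (PySem.List.pyGetD cm (p2.1 - 1) []) 0 0
    else min (min (PySem.List.pyGetD (PySem.List.pyGetD cm p2.1 []) (p1.1 - 1) 0)
                  (PySem.List.pyGetD (PySem.List.pyGetD cm (p2.1 - 1) []) (p1.1 - 1) 0))
             (PySem.List.pyGetD (PySem.List.pyGetD cm (p2.1 - 1) []) p1.1 0)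
  cm.set p2.1.toNat ((PySem.List.pyGetD cm p2.1 []).set p1.1.toNat (|p1.2 - p2.2| + penalty))

def get_cost_matrix (seq1 : List Int) (seq2 : List Int) : List (List Int) :=
  (PySem.List.enumerate seq2 0).foldl
    (fun cm p2 => (PySem.List.enumerate seq1 0).foldl (pvCellStep p2) cm)
    (seq2.map (fun _ => seq1.map (fun _ => (0 : Int))))

-- ===== PORT B =====
-- B's recursive cost(x2, x1) with the memo dict threaded through ('key in memo' → get?,
-- 'memo[key] = value' → insert).  The Nat fuel only makes the recursion structural for Lean:
-- every call the port makes carries fuel > x2 + x1, so the fuel-exhausted branch is never taken.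
def pvCost (seq1 : List Int) (seq2 : List Int) :
    Nat → PySem.Dict (Int × Int) Int → Int → Int → PySem.Dict (Int × Int) Int × Int
  | 0, memo, _, _ => (memo, 0)
  | fuel + 1, memo, x2, x1 =>
    match PySem.Dict.get? memo (x2, x1) with
    | some v => (memo, v)
    | none =>
      let p :=
        if x2 = 0 ∧ x1 = 0 then (memo, (0 : Int))
        else if x2 = 0 then pvCost seq1 seq2 fuel memo 0 (x1 - 1)
        else if x1 = 0 then pvCost seq1 seq2 fuel memo (x2 - 1) 0
        else
          let pa := pvCost seq1 seq2 fuel memo x2 (x1 - 1)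
          let pb := pvCost seq1 seq2 fuel pa.1 (x2 - 1) (x1 - 1)
          let pc := pvCost seq1 seq2 fuel pb.1 (x2 - 1) x1
          (pc.1, min (min pa.2 pb.2) pc.2)
      let value := |PySem.List.pyGetD seq1 x1 0 - PySem.List.pyGetD seq2 x2 0| + p.2
      (PySem.Dict.insert p.1 (x2, x1) value, value)

-- the double comprehension, threading the memo dict through both folds
def get_cost_matrix_alt (seq1 : List Int) (seq2 : List Int) : List (List Int) :=
  ((PySem.List.pyRange 0 (seq2.length : Int) 1).foldl
    (fun st x2 =>
      let r := (PySem.List.pyRange 0 (seq1.length : Int) 1).foldl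
        (fun st2 x1 =>
          let cv := pvCost seq1 seq2 (seq1.length + seq2.length + 1) st2.1 x2 x1
          (cv.1, st2.2 ++ [cv.2]))
        (st.1, ([] : List Int))
      (r.1, st.2 ++ [r.2]))
    (PySem.Dict.empty, ([] : List (List Int)))).2

-- ===== PRECONDITION & SPEC =====
def Spec_get_cost_matrix (seq1 : List Int) (seq2 : List Int) (out : List (List Int)) : Prop := out = get_cost_matrix_alt seq1 seq2
instance (seq1 : List Int) (seq2 : List Int) (out : List (List Int)) : Decidable (Spec_get_cost_matrix seq1 seq2 out) := by unfold Spec_get_cost_matrix; infer_instance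

-- ===== CLAIM (what is proved, stated in full; the proofs are below) =====
def Claim_equal_get_cost_matrix : Prop := ∀ (seq1 : List Int) (seq2 : List Int), Dom_get_cost_matrix seq1 seq2 → Spec_get_cost_matrix seq1 seq2 (get_cost_matrix seq1 seq2)

-- ===== LEMMAS AND PROOFS =====

-- the DTW cell value, as a pure recursion on Nat indices (the common characterization both ports meet)
def pvC (seq1 : List Int) (seq2 : List Int) (x2 x1 : Nat) : Int :=
  |seq1.getD x1 0 - seq2.getD x2 0| +
    (if _h2 : x2 = 0 then
      (if _h1 : x1 = 0 then 0 else pvC seq1 seq2 0 (x1 - 1))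
     else if _h1 : x1 = 0 then pvC seq1 seq2 (x2 - 1) 0
     else min (min (pvC seq1 seq2 x2 (x1 - 1)) (pvC seq1 seq2 (x2 - 1) (x1 - 1)))
              (pvC seq1 seq2 (x2 - 1) x1))
termination_by x2 + x1
decreasing_by all_goals omega

def pvRowC (seq1 : List Int) (seq2 : List Int) (x2 n : Nat) : List Int :=
  (List.range n).map (pvC seq1 seq2 x2)

def pvMat (seq1 : List Int) (seq2 : List Int) : List (List Int) :=
  (List.range seq2.length).map (fun x2 => pvRowC seq1 seq2 x2 seq1.length)

-- memo validity: every stored entry is the true cell value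
def pvValid (seq1 : List Int) (seq2 : List Int) (memo : PySem.Dict (Int × Int) Int) : Prop :=
  ∀ (a b : Nat) (v : Int), memo.get? ((a : Int), (b : Int)) = some v → v = pvC seq1 seq2 a b

-- generic getD/set facts used by the fold invariants
theorem pv_getD_set_self {α : Type} (l : List α) (i : Nat) (x d : α) (h : i < l.length) :
    (l.set i x).getD i d = x := by
  simp [List.getD_eq_getElem?_getD, h]

theorem pv_getD_set_ne {α : Type} (l : List α) (i k : Nat) (x d : α) (h : i ≠ k) :
    (l.set i x).getD k d = l.getD k d := by
  simp [List.getD_eq_getElem?_getD, List.getElem?_set_ne h]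

theorem pv_set_getD_self {α : Type} (l : List α) (i : Nat) (d : α) (h : i < l.length) :
    l.set i (l.getD i d) = l := by
  apply List.ext_getElem? ; intro k
  by_cases hk : k = i
  · subst hk; simp [List.getD_eq_getElem?_getD, List.getElem?_eq_getElem h]
  · simp [List.getElem?_set_ne (by omega : i ≠ k)]

theorem pv_getD_append_left {α : Type} (l m : List α) (k : Nat) (d : α) (h : k < l.length) :
    (l ++ m).getD k d = l.getD k d := by
  simp [List.getD_eq_getElem?_getD, List.getElem?_append_left h]

theorem pv_getD_append_right {α : Type} (l m : List α) (d : α) :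
    (l ++ m).getD l.length d = m.getD 0 d := by
  simp [List.getD_eq_getElem?_getD, List.getElem?_append_right (le_refl l.length)]

theorem pv_getD_drop (l : List Int) (j : Nat) (e : Int) (t : List Int) (h : l.drop j = e :: t) :
    l.getD j 0 = e := by
  have h0 : (l.drop j)[0]? = some e := by rw [h]; rfl
  rw [List.getElem?_drop] at h0
  simp only [Nat.add_zero] at h0
  simp [List.getD_eq_getElem?_getD, h0]

theorem pv_drop_succ (l : List Int) (j : Nat) (e : Int) (t : List Int) (h : l.drop j = e :: t) :
    l.drop (j + 1) = t := by
  have h1 : (l.drop j).drop 1 = t := by rw [h]; rfl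
  rw [List.drop_drop] at h1
  exact h1

-- pvRowC prefix facts
theorem pvRowC_getD (seq1 seq2 : List Int) (x2 n k : Nat) (h : k < n) :
    (pvRowC seq1 seq2 x2 n).getD k 0 = pvC seq1 seq2 x2 k := by
  unfold pvRowC
  rw [List.getD_eq_getElem?_getD, List.getElem?_map]
  simp [h]

theorem pvRowC_succ (seq1 seq2 : List Int) (x2 n : Nat) :
    pvRowC seq1 seq2 x2 (n + 1) = pvRowC seq1 seq2 x2 n ++ [pvC seq1 seq2 x2 n] := by
  simp [pvRowC, List.range_succ]

theorem pvRowC_length (seq1 seq2 : List Int) (x2 n : Nat) :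
    (pvRowC seq1 seq2 x2 n).length = n := by simp [pvRowC]

-- unfoldings of pvC in each branch
theorem pvC_zero_zero (seq1 seq2 : List Int) :
    pvC seq1 seq2 0 0 = |seq1.getD 0 0 - seq2.getD 0 0| := by
  rw [pvC]; simp

theorem pvC_zero_succ (seq1 seq2 : List Int) (x1 : Nat) (h : x1 ≠ 0) :
    pvC seq1 seq2 0 x1 = |seq1.getD x1 0 - seq2.getD 0 0| + pvC seq1 seq2 0 (x1 - 1) := by
  rw [pvC]; simp [h]

theorem pvC_succ_zero (seq1 seq2 : List Int) (x2 : Nat) (h : x2 ≠ 0) :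
    pvC seq1 seq2 x2 0 = |seq1.getD 0 0 - seq2.getD x2 0| + pvC seq1 seq2 (x2 - 1) 0 := by
  rw [pvC]; simp [h]

theorem pvC_succ_succ (seq1 seq2 : List Int) (x2 x1 : Nat) (h2 : x2 ≠ 0) (h1 : x1 ≠ 0) :
    pvC seq1 seq2 x2 x1 = |seq1.getD x1 0 - seq2.getD x2 0| +
      min (min (pvC seq1 seq2 x2 (x1 - 1)) (pvC seq1 seq2 (x2 - 1) (x1 - 1)))
          (pvC seq1 seq2 (x2 - 1) x1) := by
  rw [pvC]; simp [h2, h1]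

-- ===== B-side: the memoized recursion computes pvC =====
theorem pvValid_insert (seq1 seq2 : List Int) (memo : PySem.Dict (Int × Int) Int)
    (hv : pvValid seq1 seq2 memo) (a b : Nat) (v : Int) (hval : v = pvC seq1 seq2 a b) :
    pvValid seq1 seq2 (PySem.Dict.insert memo ((a : Int), (b : Int)) v) := by
  intro a' b' w hw
  rw [PySem.Dict.get?_insert] at hw
  by_cases h : (((a' : Nat) : Int), ((b' : Nat) : Int)) = (((a : Nat) : Int), ((b : Nat) : Int))
  · rw [Prod.mk.injEq] at h
    have ha' : a' = a := by exact_mod_cast h.1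
    have hb' : b' = b := by exact_mod_cast h.2
    subst ha'; subst hb'
    rw [if_pos rfl] at hw
    cases hw; exact hval
  · rw [if_neg h] at hw
    exact hv a' b' w hw

theorem pvCost_correct (seq1 seq2 : List Int) :
    ∀ (fuel : Nat) (a b : Nat) (memo : PySem.Dict (Int × Int) Int),
      pvValid seq1 seq2 memo → a + b < fuel →
      (pvCost seq1 seq2 fuel memo (a : Int) (b : Int)).2 = pvC seq1 seq2 a b ∧
      pvValid seq1 seq2 (pvCost seq1 seq2 fuel memo (a : Int) (b : Int)).1 := by
  intro fuel
  induction fuel with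
  | zero => intro a b memo hv hlt; omega
  | succ f ih =>
    intro a b memo hv hlt
    simp only [pvCost]
    cases hg : PySem.Dict.get? memo ((a : Int), (b : Int)) with
    | some v => exact ⟨hv a b v hg, hv⟩
    | none =>
      by_cases ha : a = 0
      · by_cases hb : b = 0
        · -- cell (0, 0)
          subst ha; subst hb
          rw [if_pos ⟨by simp, by simp⟩]
          have hval : |PySem.List.pyGetD seq1 ((0 : Nat) : Int) 0 -
              PySem.List.pyGetD seq2 ((0 : Nat) : Int) 0| + (memo, (0 : Int)).2
              = pvC seq1 seq2 0 0 := by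
            simp [pvC_zero_zero, PySem.List.pyGetD_zero, List.getD_eq_getElem?_getD]
          exact ⟨hval, pvValid_insert seq1 seq2 memo hv 0 0 _ hval⟩
        · -- first row, b ≥ 1
          subst ha
          rw [if_neg (by simp [hb]), if_pos (by simp)]
          have hcast : (((b : Nat) : Int) - 1) = (((b - 1 : Nat)) : Int) := by omega
          have hzero : (0 : Int) = ((0 : Nat) : Int) := by simp
          rw [hcast, hzero]
          obtain ⟨h2, hvd⟩ := ih 0 (b - 1) memo hv (by omega)
          have hval : |PySem.List.pyGetD seq1 ((b : Nat) : Int) 0 -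
              PySem.List.pyGetD seq2 ((0 : Nat) : Int) 0| +
              (pvCost seq1 seq2 f memo ((0 : Nat) : Int) (((b - 1 : Nat)) : Int)).2
              = pvC seq1 seq2 0 b := by
            rw [h2, PySem.List.pyGetD_natCast, PySem.List.pyGetD_natCast,
              pvC_zero_succ seq1 seq2 b hb]
          exact ⟨hval, pvValid_insert seq1 seq2 _ hvd 0 b _ hval⟩
      · by_cases hb : b = 0
        · -- first column, a ≥ 1
          subst hb
          rw [if_neg (by simp [ha]), if_neg (by simp [ha]), if_pos (by simp)]
          have hcast : (((a : Nat) : Int) - 1) = (((a - 1 : Nat)) : Int) := by omega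
          have hzero : (0 : Int) = ((0 : Nat) : Int) := by simp
          rw [hcast, hzero]
          obtain ⟨h2, hvd⟩ := ih (a - 1) 0 memo hv (by omega)
          have hval : |PySem.List.pyGetD seq1 ((0 : Nat) : Int) 0 -
              PySem.List.pyGetD seq2 ((a : Nat) : Int) 0| +
              (pvCost seq1 seq2 f memo (((a - 1 : Nat)) : Int) ((0 : Nat) : Int)).2
              = pvC seq1 seq2 a 0 := by
            rw [h2, PySem.List.pyGetD_natCast, PySem.List.pyGetD_natCast,
              pvC_succ_zero seq1 seq2 a ha]
          exact ⟨hval, pvValid_insert seq1 seq2 _ hvd a 0 _ hval⟩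
        · -- interior cell, a ≥ 1 and b ≥ 1
          rw [if_neg (by simp [ha]), if_neg (by simp [ha]), if_neg (by simp [hb])]
          have hcb : (((b : Nat) : Int) - 1) = (((b - 1 : Nat)) : Int) := by omega
          have hca : (((a : Nat) : Int) - 1) = (((a - 1 : Nat)) : Int) := by omega
          rw [hcb, hca]
          obtain ⟨e1, hv1⟩ := ih a (b - 1) memo hv (by omega)
          obtain ⟨e2, hv2⟩ := ih (a - 1) (b - 1) _ hv1 (by omega)
          obtain ⟨e3, hv3⟩ := ih (a - 1) b _ hv2 (by omega)
          have hval : |PySem.List.pyGetD seq1 ((b : Nat) : Int) 0 -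
              PySem.List.pyGetD seq2 ((a : Nat) : Int) 0| +
              min (min (pvCost seq1 seq2 f memo ((a : Nat) : Int) (((b - 1 : Nat)) : Int)).2
                   (pvCost seq1 seq2 f
                     (pvCost seq1 seq2 f memo ((a : Nat) : Int) (((b - 1 : Nat)) : Int)).1
                     (((a - 1 : Nat)) : Int) (((b - 1 : Nat)) : Int)).2)
                  (pvCost seq1 seq2 f
                    (pvCost seq1 seq2 f
                      (pvCost seq1 seq2 f memo ((a : Nat) : Int) (((b - 1 : Nat)) : Int)).1
                      (((a - 1 : Nat)) : Int) (((b - 1 : Nat)) : Int)).1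
                    (((a - 1 : Nat)) : Int) ((b : Nat) : Int)).2
              = pvC seq1 seq2 a b := by
            rw [e1, e2, e3, PySem.List.pyGetD_natCast, PySem.List.pyGetD_natCast,
              pvC_succ_succ seq1 seq2 a b ha hb]
          exact ⟨hval, pvValid_insert seq1 seq2 _ hv3 a b _ hval⟩

theorem pvB_inner (seq1 seq2 : List Int) (F x2 : Nat) :
    ∀ (n1 : Nat), x2 + n1 ≤ F → ∀ (memo : PySem.Dict (Int × Int) Int) (acc : List Int),
      pvValid seq1 seq2 memo →
      ((PySem.List.pyRange 0 (n1 : Int) 1).foldl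
        (fun st2 x1 =>
          let cv := pvCost seq1 seq2 F st2.1 ((x2 : Nat) : Int) x1
          (cv.1, st2.2 ++ [cv.2]))
        (memo, acc)).2 = acc ++ pvRowC seq1 seq2 x2 n1 ∧
      pvValid seq1 seq2
        ((PySem.List.pyRange 0 (n1 : Int) 1).foldl
          (fun st2 x1 =>
            let cv := pvCost seq1 seq2 F st2.1 ((x2 : Nat) : Int) x1
            (cv.1, st2.2 ++ [cv.2]))
          (memo, acc)).1 := by
  intro n1
  induction n1 with
  | zero =>
    intro _ memo acc hv
    simp [PySem.List.pyRange_one_eq_nil (by omega : (0 : Int) ≤ 0), pvRowC]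
    exact hv
  | succ n ihn =>
    intro hle memo acc hv
    have hsplit : PySem.List.pyRange 0 (((n + 1 : Nat)) : Int) 1
        = PySem.List.pyRange 0 ((n : Nat) : Int) 1 ++ [((n : Nat) : Int)] := by
      have hc : (((n + 1 : Nat)) : Int) = ((n : Nat) : Int) + 1 := by omega
      rw [hc, PySem.List.pyRange_one_succ_right (by omega : (0 : Int) ≤ ((n : Nat) : Int))]
    rw [hsplit, List.foldl_append]
    obtain ⟨ih2, ihv⟩ := ihn (by omega) memo acc hv
    obtain ⟨hc2, hcv⟩ := pvCost_correct seq1 seq2 F x2 n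
      ((PySem.List.pyRange 0 ((n : Nat) : Int) 1).foldl
        (fun st2 x1 =>
          let cv := pvCost seq1 seq2 F st2.1 ((x2 : Nat) : Int) x1
          (cv.1, st2.2 ++ [cv.2]))
        (memo, acc)).1 ihv (by omega)
    constructor
    · simp only [List.foldl_cons, List.foldl_nil]
      rw [ih2, hc2, pvRowC_succ, List.append_assoc]
    · simp only [List.foldl_cons, List.foldl_nil]
      exact hcv

theorem pvB_outer (seq1 seq2 : List Int) (F : Nat) :
    ∀ (n2 : Nat), n2 + seq1.length ≤ F + 1 →
      ∀ (memo : PySem.Dict (Int × Int) Int) (acc : List (List Int)),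
      pvValid seq1 seq2 memo →
      ((PySem.List.pyRange 0 (n2 : Int) 1).foldl
        (fun st x2 =>
          let r := (PySem.List.pyRange 0 (seq1.length : Int) 1).foldl
            (fun st2 x1 =>
              let cv := pvCost seq1 seq2 F st2.1 x2 x1
              (cv.1, st2.2 ++ [cv.2]))
            (st.1, ([] : List Int))
          (r.1, st.2 ++ [r.2]))
        (memo, acc)).2
        = acc ++ (List.range n2).map (fun x2 => pvRowC seq1 seq2 x2 seq1.length) := by
  intro n2
  induction n2 with
  | zero =>
    intro _ memo acc hv
    simp [PySem.List.pyRange_one_eq_nil (by omega : (0 : Int) ≤ 0)]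
  | succ n ihn =>
    intro hle memo acc hv
    have hsplit : PySem.List.pyRange 0 (((n + 1 : Nat)) : Int) 1
        = PySem.List.pyRange 0 ((n : Nat) : Int) 1 ++ [((n : Nat) : Int)] := by
      have hc : (((n + 1 : Nat)) : Int) = ((n : Nat) : Int) + 1 := by omega
      rw [hc, PySem.List.pyRange_one_succ_right (by omega : (0 : Int) ≤ ((n : Nat) : Int))]
    rw [hsplit, List.foldl_append]
    -- invariant: after the prefix, the memo is still valid (re-run the fold invariant)
    have hinv : ∀ (m : PySem.Dict (Int × Int) Int) (ac : List (List Int)) (k : Nat),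
        pvValid seq1 seq2 m → k ≤ n →
        pvValid seq1 seq2
          ((PySem.List.pyRange 0 ((k : Nat) : Int) 1).foldl
            (fun st x2 =>
              let r := (PySem.List.pyRange 0 (seq1.length : Int) 1).foldl
                (fun st2 x1 =>
                  let cv := pvCost seq1 seq2 F st2.1 x2 x1
                  (cv.1, st2.2 ++ [cv.2]))
                (st.1, ([] : List Int))
              (r.1, st.2 ++ [r.2]))
            (m, ac)).1 := by
      intro m ac k
      induction k generalizing m ac with
      | zero =>
        intro hm _
        simpa [PySem.List.pyRange_one_eq_nil (by omega : (0 : Int) ≤ 0)] using hm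
      | succ k' ihk =>
        intro hm hk
        have hsp : PySem.List.pyRange 0 (((k' + 1 : Nat)) : Int) 1
            = PySem.List.pyRange 0 ((k' : Nat) : Int) 1 ++ [((k' : Nat) : Int)] := by
          have hc : (((k' + 1 : Nat)) : Int) = ((k' : Nat) : Int) + 1 := by omega
          rw [hc, PySem.List.pyRange_one_succ_right (by omega : (0 : Int) ≤ ((k' : Nat) : Int))]
        rw [hsp, List.foldl_append]
        simp only [List.foldl_cons, List.foldl_nil]
        exact (pvB_inner seq1 seq2 F k' seq1.length (by omega) _ [] (ihk m ac hm (by omega))).2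
    obtain ⟨hrow, _⟩ := pvB_inner seq1 seq2 F n seq1.length (by omega)
      ((PySem.List.pyRange 0 ((n : Nat) : Int) 1).foldl
        (fun st x2 =>
          let r := (PySem.List.pyRange 0 (seq1.length : Int) 1).foldl
            (fun st2 x1 =>
              let cv := pvCost seq1 seq2 F st2.1 x2 x1
              (cv.1, st2.2 ++ [cv.2]))
            (st.1, ([] : List Int))
          (r.1, st.2 ++ [r.2]))
        (memo, acc)).1 [] (hinv memo acc n hv (le_refl n))
    simp only [List.foldl_cons, List.foldl_nil]
    rw [ihn (by omega) memo acc hv, hrow, List.range_succ, List.map_append, List.map_singleton]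
    simp [List.append_assoc]

theorem pv_valid_empty (seq1 seq2 : List Int) :
    pvValid seq1 seq2 (PySem.Dict.empty : PySem.Dict (Int × Int) Int) := by
  intro a b v h
  rw [PySem.Dict.get?_empty] at h
  cases h

theorem pvB_eq_pvMat (seq1 seq2 : List Int) : get_cost_matrix_alt seq1 seq2 = pvMat seq1 seq2 := by
  unfold get_cost_matrix_alt pvMat
  rw [pvB_outer seq1 seq2 (seq1.length + seq2.length + 1) seq2.length (by omega)
    PySem.Dict.empty [] (pv_valid_empty seq1 seq2)]
  simp

-- ===== A-side: the in-place fill produces pvC cell by cell =====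
-- inner fold, first row (x2 = 0), from cell j ≥ 1 on
theorem pv_innerA0 (seq1 seq2 : List Int) (e2 : Int) (he2 : seq2.getD 0 0 = e2) :
    ∀ (tail : List Int) (j : Nat) (pad : List Int) (cm : List (List Int)),
      seq1.drop j = tail → 1 ≤ j → pad.length = tail.length → cm ≠ [] →
      cm.getD 0 [] = pvRowC seq1 seq2 0 j ++ pad →
      (PySem.List.enumerate tail (j : Int)).foldl (pvCellStep (0, e2)) cm
        = cm.set 0 (pvRowC seq1 seq2 0 (j + tail.length)) := by
  intro tail
  induction tail with
  | nil =>
    intro j pad cm hdrop hj hpad hne hcm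
    have hpad0 : pad = [] := by
      cases pad with
      | nil => rfl
      | cons a b => simp at hpad
    subst hpad0
    rw [List.append_nil] at hcm
    simp only [PySem.List.enumerate_nil, List.foldl_nil, List.length_nil, Nat.add_zero]
    rw [← hcm]
    exact (pv_set_getD_self cm 0 [] (List.length_pos_of_ne_nil hne)).symm
  | cons e1 t ih =>
    intro j pad cm hdrop hj hpad hne hcm
    obtain ⟨p, pad', rfl⟩ : ∃ p pad', pad = p :: pad' := by
      cases pad with
      | nil => simp at hpad
      | cons a b => exact ⟨a, b, rfl⟩
    have h0 : 0 < cm.length := List.length_pos_of_ne_nil hne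
    have hj0 : ¬(j = 0) := by omega
    have hjlen : j < seq1.length := by
      have := congrArg List.length hdrop
      simp only [List.length_drop, List.length_cons] at this
      omega
    have he1 : seq1.getD j 0 = e1 := pv_getD_drop seq1 j e1 t hdrop
    have hdrop' : seq1.drop (j + 1) = t := pv_drop_succ seq1 j e1 t hdrop
    have hA : PySem.List.pyGetD cm ((0 : Nat) : Int) [] = pvRowC seq1 seq2 0 j ++ p :: pad' := by
      rw [PySem.List.pyGetD_natCast]; exact hcm
    have hA' : PySem.List.pyGetD cm (0 : Int) [] = pvRowC seq1 seq2 0 j ++ p :: pad' := by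
      simpa using hA
    have hj1 : ((j : Int) - 1) = ((j - 1 : Nat) : Int) := by omega
    have hRead : PySem.List.pyGetD (pvRowC seq1 seq2 0 j ++ p :: pad') ((j : Int) - 1) 0
        = pvC seq1 seq2 0 (j - 1) := by
      rw [hj1, PySem.List.pyGetD_natCast,
        pv_getD_append_left _ _ _ _ (by rw [pvRowC_length]; omega),
        pvRowC_getD seq1 seq2 0 j (j - 1) (by omega)]
    have hrow2 : ∀ (w : Int), (pvRowC seq1 seq2 0 j ++ p :: pad').set j w
        = pvRowC seq1 seq2 0 j ++ w :: pad' := by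
      intro w
      rw [List.set_append_right j w (by rw [pvRowC_length])]
      simp [pvRowC_length]
    have hval : |e1 - e2| + pvC seq1 seq2 0 (j - 1) = pvC seq1 seq2 0 j := by
      rw [pvC_zero_succ seq1 seq2 j hj0, he1, he2]
    have hjne : ¬((j : Int) = 0) := fun hcc => hj0 (by exact_mod_cast hcc)
    have hcore : pvCellStep (0, e2) cm ((j : Int), e1)
        = cm.set 0 (pvRowC seq1 seq2 0 (j + 1) ++ pad') := by
      simp only [pvCellStep, hA', hRead, hjne, and_false, if_true, if_false,
        Int.toNat_natCast, Int.toNat_zero]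
      rw [hrow2, hval, pvRowC_succ, List.append_assoc]
      rfl
    rw [PySem.List.enumerate_cons, List.foldl_cons, hcore]
    have hc : ((j : Int) + 1) = ((j + 1 : Nat) : Int) := by omega
    rw [hc]
    rw [ih (j + 1) pad' (cm.set 0 (pvRowC seq1 seq2 0 (j + 1) ++ pad'))
        hdrop' (by omega) (by simpa using hpad)
        (by apply List.ne_nil_of_length_pos; simpa using h0)
        (pv_getD_set_self cm 0 _ [] h0)]
    rw [List.set_set]
    have : j + 1 + t.length = j + (e1 :: t).length := by simp; omega
    rw [this]

-- inner fold, later rows (x2 ≥ 1), from cell j ≥ 1 on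
theorem pv_innerA (seq1 seq2 : List Int) (x2 : Nat) (hx1 : 1 ≤ x2) (e2 : Int)
    (he2 : seq2.getD x2 0 = e2) :
    ∀ (tail : List Int) (j : Nat) (pad : List Int) (cm : List (List Int)),
      seq1.drop j = tail → 1 ≤ j → pad.length = tail.length → x2 < cm.length →
      cm.getD x2 [] = pvRowC seq1 seq2 x2 j ++ pad →
      cm.getD (x2 - 1) [] = pvRowC seq1 seq2 (x2 - 1) seq1.length →
      (PySem.List.enumerate tail (j : Int)).foldl (pvCellStep ((x2 : Int), e2)) cm
        = cm.set x2 (pvRowC seq1 seq2 x2 (j + tail.length)) := by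
  intro tail
  induction tail with
  | nil =>
    intro j pad cm hdrop hj hpad hx hcm hprev
    have hpad0 : pad = [] := by
      cases pad with
      | nil => rfl
      | cons a b => simp at hpad
    subst hpad0
    rw [List.append_nil] at hcm
    simp only [PySem.List.enumerate_nil, List.foldl_nil, List.length_nil, Nat.add_zero]
    rw [← hcm]
    exact (pv_set_getD_self cm x2 [] hx).symm
  | cons e1 t ih =>
    intro j pad cm hdrop hj hpad hx hcm hprev
    obtain ⟨p, pad', rfl⟩ : ∃ p pad', pad = p :: pad' := by
      cases pad with
      | nil => simp at hpad
      | cons a b => exact ⟨a, b, rfl⟩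
    have hj0 : ¬(j = 0) := by omega
    have hx20 : ¬(x2 = 0) := by omega
    have hjlen : j < seq1.length := by
      have := congrArg List.length hdrop
      simp only [List.length_drop, List.length_cons] at this
      omega
    have he1 : seq1.getD j 0 = e1 := pv_getD_drop seq1 j e1 t hdrop
    have hdrop' : seq1.drop (j + 1) = t := pv_drop_succ seq1 j e1 t hdrop
    have hj1 : ((j : Int) - 1) = ((j - 1 : Nat) : Int) := by omega
    have hx21 : ((x2 : Int) - 1) = ((x2 - 1 : Nat) : Int) := by omega
    have hA : PySem.List.pyGetD cm ((x2 : Nat) : Int) [] = pvRowC seq1 seq2 x2 j ++ p :: pad' := by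
      rw [PySem.List.pyGetD_natCast]; exact hcm
    have hP : PySem.List.pyGetD cm ((x2 : Int) - 1) [] = pvRowC seq1 seq2 (x2 - 1) seq1.length := by
      rw [hx21, PySem.List.pyGetD_natCast]; exact hprev
    have hReadL : PySem.List.pyGetD (pvRowC seq1 seq2 x2 j ++ p :: pad') ((j : Int) - 1) 0
        = pvC seq1 seq2 x2 (j - 1) := by
      rw [hj1, PySem.List.pyGetD_natCast,
        pv_getD_append_left _ _ _ _ (by rw [pvRowC_length]; omega),
        pvRowC_getD seq1 seq2 x2 j (j - 1) (by omega)]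
    have hReadD : PySem.List.pyGetD (pvRowC seq1 seq2 (x2 - 1) seq1.length) ((j : Int) - 1) 0
        = pvC seq1 seq2 (x2 - 1) (j - 1) := by
      rw [hj1, PySem.List.pyGetD_natCast, pvRowC_getD seq1 seq2 (x2 - 1) seq1.length (j - 1) (by omega)]
    have hReadU : PySem.List.pyGetD (pvRowC seq1 seq2 (x2 - 1) seq1.length) ((j : Nat) : Int) 0
        = pvC seq1 seq2 (x2 - 1) j := by
      rw [PySem.List.pyGetD_natCast, pvRowC_getD seq1 seq2 (x2 - 1) seq1.length j hjlen]
    have hrow2 : ∀ (w : Int), (pvRowC seq1 seq2 x2 j ++ p :: pad').set j w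
        = pvRowC seq1 seq2 x2 j ++ w :: pad' := by
      intro w
      rw [List.set_append_right j w (by rw [pvRowC_length])]
      simp [pvRowC_length]
    have hval : |e1 - e2| +
        min (min (pvC seq1 seq2 x2 (j - 1)) (pvC seq1 seq2 (x2 - 1) (j - 1)))
            (pvC seq1 seq2 (x2 - 1) j) = pvC seq1 seq2 x2 j := by
      rw [pvC_succ_succ seq1 seq2 x2 j hx20 hj0, he1, he2]
    have hx2ne : ¬((x2 : Int) = 0) := fun hcc => hx20 (by exact_mod_cast hcc)
    have hjne : ¬((j : Int) = 0) := fun hcc => hj0 (by exact_mod_cast hcc)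
    have hcore : pvCellStep ((x2 : Int), e2) cm ((j : Int), e1)
        = cm.set x2 (pvRowC seq1 seq2 x2 (j + 1) ++ pad') := by
      simp only [pvCellStep, hA, hP, hReadL, hReadD, hReadU, hx2ne, hjne, and_false,
        if_false, Int.toNat_natCast]
      rw [hrow2, hval, pvRowC_succ, List.append_assoc]
      rfl
    rw [PySem.List.enumerate_cons, List.foldl_cons, hcore]
    have hc : ((j : Int) + 1) = ((j + 1 : Nat) : Int) := by omega
    rw [hc]
    rw [ih (j + 1) pad' (cm.set x2 (pvRowC seq1 seq2 x2 (j + 1) ++ pad'))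
        hdrop' (by omega) (by simpa using hpad)
        (by simpa using hx)
        (pv_getD_set_self cm x2 _ [] hx)
        (by rw [pv_getD_set_ne cm x2 (x2 - 1) _ [] (by omega)]; exact hprev)]
    rw [List.set_set]
    have : j + 1 + t.length = j + (e1 :: t).length := by simp; omega
    rw [this]

-- one whole pass of A's inner loop, first row
theorem pv_row0 (seq1 seq2 : List Int) (e2 : Int) (he2 : seq2.getD 0 0 = e2)
    (cm : List (List Int)) (hne : cm ≠ [])
    (h0 : cm.getD 0 [] = List.replicate seq1.length (0 : Int)) :
    (PySem.List.enumerate seq1 0).foldl (pvCellStep (0, e2)) cm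
      = cm.set 0 (pvRowC seq1 seq2 0 seq1.length) := by
  have hl : 0 < cm.length := List.length_pos_of_ne_nil hne
  by_cases hnil : seq1 = []
  · subst hnil
    have h0' : cm.getD 0 [] = [] := by simpa using h0
    simp only [PySem.List.enumerate_nil, List.foldl_nil, List.length_nil]
    rw [show pvRowC [] seq2 0 0 = [] from rfl, ← h0']
    exact (pv_set_getD_self cm 0 [] hl).symm
  · obtain ⟨e1, rest, hs⟩ : ∃ e1 rest, seq1 = e1 :: rest := by
      cases seq1 with
      | nil => exact absurd rfl hnil
      | cons a b => exact ⟨a, b, rfl⟩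
    have hslen : seq1.length = rest.length + 1 := by rw [hs]; rfl
    have he1 : seq1.getD 0 0 = e1 := by rw [hs]; rfl
    have hdrop1 : seq1.drop 1 = rest := by rw [hs]; rfl
    have hA : PySem.List.pyGetD cm (0 : Int) [] = (0 : Int) :: List.replicate rest.length 0 := by
      have h := PySem.List.pyGetD_natCast cm 0 ([] : List Int)
      simp only [Nat.cast_zero] at h
      rw [h, h0, hslen, List.replicate_succ]
    have hval : |e1 - e2| = pvC seq1 seq2 0 0 := by
      rw [pvC_zero_zero, he1, he2]
    have hcore : pvCellStep (0, e2) cm ((0 : Int), e1)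
        = cm.set 0 (pvRowC seq1 seq2 0 1 ++ List.replicate rest.length 0) := by
      simp only [pvCellStep, hA, and_self, if_true, Int.toNat_zero, List.set_cons_zero, add_zero]
      rw [show pvRowC seq1 seq2 0 1 = [pvC seq1 seq2 0 0] from by
        simp [pvRowC, List.range_one], ← hval]
      rfl
    have henum : PySem.List.enumerate seq1 (0 : Int)
        = ((0 : Int), e1) :: PySem.List.enumerate rest ((0 : Int) + 1) := by
      rw [hs, PySem.List.enumerate_cons]
    rw [henum, List.foldl_cons, hcore]
    have hc : ((0 : Int) + 1) = ((1 : Nat) : Int) := by omega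
    rw [hc]
    rw [pv_innerA0 seq1 seq2 e2 he2 rest 1 (List.replicate rest.length 0)
        (cm.set 0 (pvRowC seq1 seq2 0 1 ++ List.replicate rest.length 0))
        hdrop1 (le_refl 1) (by simp)
        (by apply List.ne_nil_of_length_pos; simpa using hl)
        (pv_getD_set_self cm 0 _ [] hl)]
    rw [List.set_set]
    have hlast : 1 + rest.length = seq1.length := by rw [hslen]; omega
    rw [hlast]

-- one whole pass of A's inner loop, later rows
theorem pv_rowK (seq1 seq2 : List Int) (e2 : Int) (x2 : Nat) (hx1 : 1 ≤ x2)
    (he2 : seq2.getD x2 0 = e2) (cm : List (List Int)) (hx : x2 < cm.length)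
    (hz : cm.getD x2 [] = List.replicate seq1.length (0 : Int))
    (hp : cm.getD (x2 - 1) [] = pvRowC seq1 seq2 (x2 - 1) seq1.length) :
    (PySem.List.enumerate seq1 0).foldl (pvCellStep ((x2 : Int), e2)) cm
      = cm.set x2 (pvRowC seq1 seq2 x2 seq1.length) := by
  by_cases hnil : seq1 = []
  · subst hnil
    have hz' : cm.getD x2 [] = [] := by simpa using hz
    simp only [PySem.List.enumerate_nil, List.foldl_nil, List.length_nil]
    rw [show pvRowC [] seq2 x2 0 = [] from rfl, ← hz']
    exact (pv_set_getD_self cm x2 [] hx).symm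
  · obtain ⟨e1, rest, hs⟩ : ∃ e1 rest, seq1 = e1 :: rest := by
      cases seq1 with
      | nil => exact absurd rfl hnil
      | cons a b => exact ⟨a, b, rfl⟩
    have hslen : seq1.length = rest.length + 1 := by rw [hs]; rfl
    have hx20 : ¬(x2 = 0) := by omega
    have hx21 : ((x2 : Int) - 1) = ((x2 - 1 : Nat) : Int) := by omega
    have he1 : seq1.getD 0 0 = e1 := by rw [hs]; rfl
    have hdrop1 : seq1.drop 1 = rest := by rw [hs]; rfl
    have h0len : 0 < seq1.length := by rw [hslen]; omega
    have hA : PySem.List.pyGetD cm ((x2 : Nat) : Int) []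
        = (0 : Int) :: List.replicate rest.length 0 := by
      rw [PySem.List.pyGetD_natCast, hz, hslen, List.replicate_succ]
    have hP : PySem.List.pyGetD cm ((x2 : Int) - 1) [] = pvRowC seq1 seq2 (x2 - 1) seq1.length := by
      rw [hx21, PySem.List.pyGetD_natCast]; exact hp
    have hRead0 : PySem.List.pyGetD (pvRowC seq1 seq2 (x2 - 1) seq1.length) (0 : Int) 0
        = pvC seq1 seq2 (x2 - 1) 0 := by
      have h := PySem.List.pyGetD_natCast (pvRowC seq1 seq2 (x2 - 1) seq1.length) 0 (0 : Int)
      simp only [Nat.cast_zero] at h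
      rw [h, pvRowC_getD seq1 seq2 (x2 - 1) seq1.length 0 h0len]
    have hval : |e1 - e2| + pvC seq1 seq2 (x2 - 1) 0 = pvC seq1 seq2 x2 0 := by
      rw [pvC_succ_zero seq1 seq2 x2 hx20, he1, he2]
    have hx2ne : ¬((x2 : Int) = 0) := fun hcc => hx20 (by exact_mod_cast hcc)
    have hcore : pvCellStep ((x2 : Int), e2) cm ((0 : Int), e1)
        = cm.set x2 (pvRowC seq1 seq2 x2 1 ++ List.replicate rest.length 0) := by
      simp only [pvCellStep, hA, hP, hRead0, hx2ne, and_true, if_true, if_false,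
        Int.toNat_natCast, Int.toNat_zero, List.set_cons_zero]
      rw [hval]
      rw [show pvRowC seq1 seq2 x2 1 = [pvC seq1 seq2 x2 0] from by
        simp [pvRowC, List.range_one]]
      rfl
    have henum : PySem.List.enumerate seq1 (0 : Int)
        = ((0 : Int), e1) :: PySem.List.enumerate rest ((0 : Int) + 1) := by
      rw [hs, PySem.List.enumerate_cons]
    rw [henum, List.foldl_cons, hcore]
    have hc : ((0 : Int) + 1) = ((1 : Nat) : Int) := by omega
    rw [hc]
    rw [pv_innerA seq1 seq2 x2 hx1 e2 he2 rest 1 (List.replicate rest.length 0)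
        (cm.set x2 (pvRowC seq1 seq2 x2 1 ++ List.replicate rest.length 0))
        hdrop1 (le_refl 1) (by simp)
        (by simpa using hx)
        (pv_getD_set_self cm x2 _ [] hx)
        (by rw [pv_getD_set_ne cm x2 (x2 - 1) _ [] (by omega)]; exact hp)]
    rw [List.set_set]
    have hlast : 1 + rest.length = seq1.length := by rw [hslen]; omega
    rw [hlast]

-- the outer loop from row k ≥ 1 on
theorem pv_outer (seq1 seq2 : List Int) :
    ∀ (t2 : List Int) (k : Nat), seq2.drop k = t2 → 1 ≤ k →
      (PySem.List.enumerate t2 (k : Int)).foldl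
          (fun cm p2 => (PySem.List.enumerate seq1 0).foldl (pvCellStep p2) cm)
          ((List.range k).map (fun x2 => pvRowC seq1 seq2 x2 seq1.length)
            ++ List.replicate t2.length (List.replicate seq1.length (0 : Int)))
        = (List.range (k + t2.length)).map (fun x2 => pvRowC seq1 seq2 x2 seq1.length) := by
  intro t2
  induction t2 with
  | nil =>
    intro k hdrop hk
    simp [PySem.List.enumerate_nil]
  | cons e2 t2' ih =>
    intro k hdrop hk
    have he2 : seq2.getD k 0 = e2 := pv_getD_drop seq2 k e2 t2' hdrop
    have hdrop' : seq2.drop (k + 1) = t2' := pv_drop_succ seq2 k e2 t2' hdrop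
    have hdl : ((List.range k).map (fun x2 => pvRowC seq1 seq2 x2 seq1.length)).length = k := by
      simp
    rw [PySem.List.enumerate_cons]
    simp only [List.foldl_cons, List.length_cons, List.replicate_succ]
    have hgz : ((List.range k).map (fun x2 => pvRowC seq1 seq2 x2 seq1.length)
          ++ List.replicate seq1.length (0 : Int)
            :: List.replicate t2'.length (List.replicate seq1.length (0 : Int))).getD k []
        = List.replicate seq1.length (0 : Int) := by
      have h := pv_getD_append_right
        ((List.range k).map (fun x2 => pvRowC seq1 seq2 x2 seq1.length))
        (List.replicate seq1.length (0 : Int)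
          :: List.replicate t2'.length (List.replicate seq1.length (0 : Int))) ([] : List Int)
      rw [hdl] at h
      exact h
    have hgp : ((List.range k).map (fun x2 => pvRowC seq1 seq2 x2 seq1.length)
          ++ List.replicate seq1.length (0 : Int)
            :: List.replicate t2'.length (List.replicate seq1.length (0 : Int))).getD (k - 1) []
        = pvRowC seq1 seq2 (k - 1) seq1.length := by
      rw [pv_getD_append_left _ _ _ _ (by simp only [List.length_map, List.length_range]; omega)]
      rw [List.getD_eq_getElem?_getD, List.getElem?_map]
      simp [(by omega : k - 1 < k)]
    have hklt : k < ((List.range k).map (fun x2 => pvRowC seq1 seq2 x2 seq1.length)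
          ++ List.replicate seq1.length (0 : Int)
            :: List.replicate t2'.length (List.replicate seq1.length (0 : Int))).length := by
      rw [List.length_append, hdl]
      simp
    rw [pv_rowK seq1 seq2 e2 k hk he2 _ hklt hgz hgp]
    have hset : ((List.range k).map (fun x2 => pvRowC seq1 seq2 x2 seq1.length)
          ++ List.replicate seq1.length (0 : Int)
            :: List.replicate t2'.length (List.replicate seq1.length (0 : Int))).set k
          (pvRowC seq1 seq2 k seq1.length)
        = (List.range (k + 1)).map (fun x2 => pvRowC seq1 seq2 x2 seq1.length)
          ++ List.replicate t2'.length (List.replicate seq1.length (0 : Int)) := by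
      rw [List.set_append_right k _ (by rw [hdl])]
      rw [hdl, Nat.sub_self, List.set_cons_zero, List.range_succ, List.map_append]
      simp
    rw [hset]
    have hc : ((k : Int) + 1) = ((k + 1 : Nat) : Int) := by omega
    rw [hc]
    rw [ih (k + 1) hdrop' (by omega)]
    have hfin : k + 1 + t2'.length = k + (t2'.length + 1) := by omega
    rw [hfin]

theorem pvA_eq_pvMat (seq1 seq2 : List Int) : get_cost_matrix seq1 seq2 = pvMat seq1 seq2 := by
  unfold get_cost_matrix pvMat
  by_cases hnil : seq2 = []
  · subst hnil
    simp [PySem.List.enumerate_nil]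
  · obtain ⟨f2, t2, hs⟩ : ∃ f2 t2, seq2 = f2 :: t2 := by
      cases seq2 with
      | nil => exact absurd rfl hnil
      | cons a b => exact ⟨a, b, rfl⟩
    have hslen : seq2.length = t2.length + 1 := by rw [hs]; rfl
    have he2 : seq2.getD 0 0 = f2 := by rw [hs]; rfl
    have hdrop1 : seq2.drop 1 = t2 := by rw [hs]; rfl
    have henum : PySem.List.enumerate seq2 (0 : Int)
        = ((0 : Int), f2) :: PySem.List.enumerate t2 ((0 : Int) + 1) := by
      rw [hs, PySem.List.enumerate_cons]
    have hinit : seq2.map (fun _ => seq1.map (fun _ => (0 : Int)))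
        = List.replicate seq1.length (0 : Int)
          :: List.replicate t2.length (List.replicate seq1.length (0 : Int)) := by
      rw [hs]
      simp [List.map_const']
    rw [henum, List.foldl_cons, hinit]
    rw [pv_row0 seq1 seq2 f2 he2 _ (by simp) (by simp)]
    rw [show (List.replicate seq1.length (0 : Int)
          :: List.replicate t2.length (List.replicate seq1.length (0 : Int))).set 0
          (pvRowC seq1 seq2 0 seq1.length)
        = (List.range 1).map (fun x2 => pvRowC seq1 seq2 x2 seq1.length)
          ++ List.replicate t2.length (List.replicate seq1.length (0 : Int)) from by
      simp [List.range_one]]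
    rw [show ((0 : Int) + 1) = ((1 : Nat) : Int) by omega]
    rw [pv_outer seq1 seq2 t2 1 hdrop1 (le_refl 1)]
    rw [show 1 + t2.length = seq2.length from by rw [hslen]; omega]

-- ===== VERDICT (by name: the statement is the Claim_ definition above) =====
theorem get_cost_matrix_spec : Claim_equal_get_cost_matrix := by
  unfold Claim_equal_get_cost_matrix
  intro seq1 seq2 _
  unfold Spec_get_cost_matrix
  rw [pvA_eq_pvMat, pvB_eq_pvMat]
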